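-- pv_equiv track=rewrite | github.com/enekassooo/examen_seguridad | Descifrar_texto_para_examen.py | contar_apariciones_letras
-- ===== SOURCE A (Python) =====
-- def contar_apariciones_letras(frase):
--     dic_letras = {}
--
--     # Iterar a través de cada carácter en la frase
--     for caracter in frase:
--
--         # Verificar si el carácter es una letra
--         if caracter.isalpha():
--             # Si existe, incrementar su contador
--             if caracter in dic_letras:
--                 dic_letras[caracter] += 1
--             # Si no existe, agregarlo con un contador inicial de 1
--             else:
--                 dic_letras[caracter] = 1
--
--     return dic_letras
-- ===== SOURCE B (Python) =====
-- def contar_apariciones_letras(frase):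
--     letras = [c for c in frase if c.isalpha()]
--     return {c: letras.count(c) for c in dict.fromkeys(letras)}
-- ===== Notes on version B (the rewrite author's own statement) =====
-- stated objective: alternative
-- what changed: Replaces A's per-character dict-update loop with a two-phase decomposition: filter the alphabetic characters, dedup them in first-occurrence order, and build the dict by counting each distinct letter with list.count.
import Mathlib
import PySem

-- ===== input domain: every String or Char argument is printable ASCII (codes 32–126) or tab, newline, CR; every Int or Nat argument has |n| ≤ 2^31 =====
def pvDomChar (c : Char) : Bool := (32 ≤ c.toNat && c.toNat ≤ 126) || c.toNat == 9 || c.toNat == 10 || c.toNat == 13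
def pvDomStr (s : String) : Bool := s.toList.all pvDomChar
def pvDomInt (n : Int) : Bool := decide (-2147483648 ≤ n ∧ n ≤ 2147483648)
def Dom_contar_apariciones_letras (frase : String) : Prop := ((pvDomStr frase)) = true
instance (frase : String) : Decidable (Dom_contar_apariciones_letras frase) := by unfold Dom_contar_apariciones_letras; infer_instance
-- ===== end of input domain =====

-- B counts each distinct letter with one count scan over the filtered letters (dedup + count) instead of A's
-- per-character dict-update loop; objective: alternative decomposition, same observable result.

-- ===== PORT A =====
-- one-pass loop: for each alphabetic character, bump (or create) its dict entry
def contar_apariciones_letras (frase : String) : List (String × Int) :=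
  (frase.toList.foldl
    (fun (dic_letras : PySem.Dict String Int) caracter =>
      if PySem.Chars.isalpha caracter then
        if dic_letras.contains (String.ofList [caracter]) then
          dic_letras.insert (String.ofList [caracter])
            (dic_letras.getD (String.ofList [caracter]) 0 + 1)
        else
          dic_letras.insert (String.ofList [caracter]) 1
      else dic_letras)
    PySem.Dict.empty).items

-- ===== PORT B =====
-- letras = [c for c in frase if c.isalpha()]; {c: letras.count(c) for c in dict.fromkeys(letras)}
def contar_apariciones_letras_alt (frase : String) : List (String × Int) :=
  let letras := frase.toList.filter PySem.Chars.isalpha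
  (PySem.List.dedup letras).map (fun c => (String.ofList [c], (letras.count c : Int)))

-- ===== PRECONDITION & SPEC =====
def Spec_contar_apariciones_letras (frase : String) (out : List (String × Int)) : Prop := out = contar_apariciones_letras_alt frase
instance (frase : String) (out : List (String × Int)) : Decidable (Spec_contar_apariciones_letras frase out) := by unfold Spec_contar_apariciones_letras; infer_instance

-- ===== CLAIM (what is proved, stated in full; the proofs are below) =====
def Claim_equal_contar_apariciones_letras : Prop := ∀ (frase : String), Dom_contar_apariciones_letras frase → Spec_contar_apariciones_letras frase (contar_apariciones_letras frase)

-- ===== LEMMAS AND PROOFS =====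

theorem pvKey_injective : Function.Injective (fun c : Char => String.ofList [c]) := by
  intro a b h
  have h2 := congrArg String.toList h
  simpa using h2

theorem pvDiscard_map (s : List Char) (x : Char) :
    PySem.Set.discard (s.map (fun c : Char => String.ofList [c])) (String.ofList [x])
      = (PySem.Set.discard s x).map (fun c : Char => String.ofList [c]) := by
  simp only [PySem.Set.discard, List.filter_map]
  refine congrArg _ (List.filter_congr ?_)
  intro y _
  by_cases h : y = x
  · simp [h]
  · have h' : String.ofList [y] ≠ String.ofList [x] := fun hh => h (pvKey_injective hh)
    simp [Function.comp, h, h']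

theorem pvOfList_map (l : List Char) :
    PySem.Set.ofList (l.map (fun c : Char => String.ofList [c]))
      = (PySem.Set.ofList l).map (fun c : Char => String.ofList [c]) := by
  induction l with
  | nil => rfl
  | cons x xs ih =>
    rw [List.map_cons, PySem.Set.ofList_cons, PySem.Set.ofList_cons, ih, pvDiscard_map,
      List.map_cons]

-- ===== VERDICT (by name: the statement is the Claim_ definition above) =====
theorem contar_apariciones_letras_spec : Claim_equal_contar_apariciones_letras := by
  intro frase _
  unfold Spec_contar_apariciones_letras contar_apariciones_letras contar_apariciones_letras_alt
  -- merge A's two branches: an absent key holds the default 0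
  have hbody :
      (fun (d : PySem.Dict String Int) (c : Char) =>
        if PySem.Chars.isalpha c then
          if d.contains (String.ofList [c]) then
            d.insert (String.ofList [c]) (d.getD (String.ofList [c]) 0 + 1)
          else d.insert (String.ofList [c]) 1
        else d)
      = (fun (d : PySem.Dict String Int) (c : Char) =>
        if PySem.Chars.isalpha c then
          d.insert (String.ofList [c]) (d.getD (String.ofList [c]) 0 + 1)
        else d) := by
    funext d c
    by_cases ha : PySem.Chars.isalpha c
    · by_cases hc : d.contains (String.ofList [c])
      · simp [ha, hc]
      · have h0 : d.getD (String.ofList [c]) 0 = 0 :=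
          PySem.Dict.getD_of_not_contains _ _ (by simpa using hc)
        simp [ha, hc, h0]
    · simp [ha]
  rw [hbody]
  have hfold :
      frase.toList.foldl
        (fun (d : PySem.Dict String Int) (c : Char) =>
          if PySem.Chars.isalpha c then
            d.insert (String.ofList [c]) (d.getD (String.ofList [c]) 0 + 1)
          else d)
        PySem.Dict.empty
      = ((frase.toList.filter PySem.Chars.isalpha).map
          (fun c : Char => String.ofList [c])).foldl
          (fun (d : PySem.Dict String Int) k => d.insert k (d.getD k 0 + 1))
          PySem.Dict.empty := by
    rw [List.foldl_map, List.foldl_filter]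
  rw [hfold, PySem.Dict.foldl_insert_getD_add_one_eq_counter, PySem.Dict.items_counter,
    pvOfList_map, ← PySem.List.dedup_eq_ofList, List.map_map]
  refine List.map_congr_left ?_
  intro c _
  simp [List.count_map_of_injective _ _ pvKey_injective]
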